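-- pv_equiv track=rewrite | github.com/KKZbinyakov/SCL-decoder | SCL-decoder.py | polar_encode
-- ===== SOURCE A (Python) =====
-- import math
--
-- def concat(u, v):
--     """
--     Combines two vectors using XOR operation.
--
--     Format: (u[0]⊕v[0], u[1]⊕v[1], ..., v[0], v[1], ...)
--
--     Args:
--         u (list): First bit vector
--         v (list): Second bit vector
--
--     Returns:
--         list: Combined vector
--     """
--     return list((a ^ b for a, b in zip(u, v))) + v
--
-- def polar_encode(message):
--     """
--     Encodes a binary message into polar code using binary tree construction.
--
--     Process:
--         1. Builds tree bottom-up
--         2. Leaves = original message bits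
--         3. Parent nodes = concat(left_child, right_child)
--
--     Args:
--         message (list): Binary bits to encode (0/1)
--
--     Returns:
--         list: Encoded message (root of tree)
--     """
--     tree = []
--     for i in range(int(math.log2(len(message))) + 1):
--         tree.append([])
--     curnodes = 1
--     for level in range(len(tree)):
--         for node in range(curnodes):
--             tree[level].append([])
--         curnodes *= 2
--
--     for i in range(len(message)):
--         tree[-1][i] = [message[i]]
--
--     for level in range(len(tree) - 2, -1, -1):
--         for node in range(len(tree[level])):
--             left_child = tree[level + 1][2 * node]
--             right_child = tree[level + 1][2 * node + 1]
--             tree[level][node] = concat(left_child, right_child)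
--     return tree[0][0]
-- ===== SOURCE B (Python) =====
-- def polar_encode(message):
--     """Recursive divide-and-conquer polar encoding (same XOR-combine)."""
--     n = len(message)
--     if n == 1:
--         return [message[0]]
--     half = n // 2
--     u = polar_encode(message[:half])
--     v = polar_encode(message[half:])
--     return [a ^ b for a, b in zip(u, v)] + v
-- ===== Notes on version B (the rewrite author's own statement) =====
-- stated objective: simpler
-- what changed: Replaces the explicitly built level-by-level tree of node lists (preallocated levels, indexed in-place assignment, bottom-up collapse) with a direct divide-and-conquer recursion that splits the message in half, encodes each half, and XOR-combines on the way back up.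
import Mathlib
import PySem

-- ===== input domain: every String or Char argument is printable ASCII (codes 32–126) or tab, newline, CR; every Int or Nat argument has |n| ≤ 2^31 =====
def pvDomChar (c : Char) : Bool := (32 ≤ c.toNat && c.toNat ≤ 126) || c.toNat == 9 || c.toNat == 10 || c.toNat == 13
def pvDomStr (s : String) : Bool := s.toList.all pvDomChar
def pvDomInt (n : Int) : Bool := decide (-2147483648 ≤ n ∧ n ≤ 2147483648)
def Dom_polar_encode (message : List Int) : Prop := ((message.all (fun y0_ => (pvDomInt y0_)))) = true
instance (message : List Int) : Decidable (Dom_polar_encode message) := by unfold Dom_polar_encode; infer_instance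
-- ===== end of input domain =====

-- ===== PORT A =====
-- B replaces A's explicit level-by-level tree with a direct divide-and-conquer recursion (objective: simpler).
-- A raises (ValueError/IndexError) unless len(message) is a power of two; Pre_ admits exactly those inputs.
def pvConcat (u v : List Int) : List Int :=
  (List.zipWith (fun a b => PySem.Int.bxor a b) u v) ++ v

-- one pass of the backward loop body: tree[level][node] = concat(tree[level+1][2n], tree[level+1][2n+1])
-- (the in-place slot assignments over range(len(tree[level])) are rendered as a map over the same range;
--  exact under Pre_, where every index written is in range)
def pvStepA (t : List (List (List Int))) (level : Nat) : List (List (List Int)) :=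
  let lower := t.getD (level + 1) []
  t.set level ((List.range (t.getD level []).length).map
    (fun node => pvConcat (lower.getD (2 * node) []) (lower.getD (2 * node + 1) [])))

def polar_encode (message : List Int) : List Int :=
  let nlv := Nat.log2 message.length + 1          -- int(math.log2(len(message))) + 1 (exact on Pre_'s powers of two)
  -- the two set-up loops (append a level, then append curnodes empty nodes, curnodes *= 2):
  let tree0 := ((List.range nlv).foldl
      (fun (st : List (List (List Int)) × Nat) _ =>
        (st.1 ++ [List.replicate st.2 ([] : List Int)], st.2 * 2)) ([], 1)).1
  -- for i in range(len(message)): tree[-1][i] = [message[i]]  (slot assignments rendered as a map over the same range)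
  let leaves := (List.range message.length).map (fun i => [message.getD i 0])
  let tree1 := tree0.set (nlv - 1) leaves
  -- for level in range(len(tree)-2, -1, -1): …  ((List.range (nlv-1)).reverse = [nlv-2, …, 0])
  let tree2 := ((List.range (nlv - 1)).reverse).foldl pvStepA tree1
  (tree2.getD 0 []).getD 0 []

-- ===== PORT B =====
def polar_encode_alt (message : List Int) : List Int :=
  -- n == 1 returns [message[0]] = message; the `≤ 1` guard only makes the empty case total
  -- (Python B recurses forever there; [] is outside Pre_)
  if _h : message.length ≤ 1 then message
  else
    let half := message.length / 2
    let u := polar_encode_alt (message.take half)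
    let v := polar_encode_alt (message.drop half)
    (List.zipWith (fun a b => PySem.Int.bxor a b) u v) ++ v
termination_by message.length
decreasing_by
  · simp only [List.length_take]; omega
  · simp only [List.length_drop]; omega

-- ===== PRECONDITION & SPEC =====
-- A raises unless len(message) is a power of two (ValueError on [], IndexError otherwise); Pre_ excludes exactly those.
def Pre_polar_encode (message : List Int) : Prop :=
  message.length = 2 ^ Nat.log2 message.length
instance (message : List Int) : Decidable (Pre_polar_encode message) := by
  unfold Pre_polar_encode; infer_instance
def pvWitness_polar_encode : List Int := [1, 0, 1, 1]

def Spec_polar_encode (message : List Int) (out : List Int) : Prop := out = polar_encode_alt message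
instance (message : List Int) (out : List Int) : Decidable (Spec_polar_encode message out) := by unfold Spec_polar_encode; infer_instance

-- ===== CLAIM (what is proved, stated in full; the proofs are below) =====
def Claim_equal_polar_encode : Prop := ∀ (message : List Int), Dom_polar_encode message → Pre_polar_encode message → Spec_polar_encode message (polar_encode message)

-- ===== LEMMAS AND PROOFS =====

-- the list of 2^j contiguous sub-blocks of the message at tree level j, split top-down
def pvChunks : Nat → List Int → List (List Int)
  | 0, msg => [msg]
  | j + 1, msg => (pvChunks j msg).flatMap (fun b => [b.take (b.length / 2), b.drop (b.length / 2)])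

theorem pvChunks_length (j : Nat) (msg : List Int) : (pvChunks j msg).length = 2 ^ j := by
  induction j with
  | zero => simp [pvChunks]
  | succ j ih =>
    rw [pvChunks, List.length_flatMap]
    simp only [List.length_cons, List.length_nil]
    rw [List.map_const']
    simp [List.sum_replicate, ih, pow_succ, Nat.mul_comm]

theorem pvChunks_append (j : Nat) (msg : List Int) :
    pvChunks (j + 1) msg =
      pvChunks j (msg.take (msg.length / 2)) ++ pvChunks j (msg.drop (msg.length / 2)) := by
  induction j with
  | zero => simp [pvChunks]
  | succ j ih =>
    rw [pvChunks, ih, List.flatMap_append]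
    rw [show pvChunks (j + 1) (msg.take (msg.length / 2)) =
        (pvChunks j (msg.take (msg.length / 2))).flatMap
          (fun b => [b.take (b.length / 2), b.drop (b.length / 2)]) from rfl]
    rw [show pvChunks (j + 1) (msg.drop (msg.length / 2)) =
        (pvChunks j (msg.drop (msg.length / 2))).flatMap
          (fun b => [b.take (b.length / 2), b.drop (b.length / 2)]) from rfl]

theorem pvChunks_block_length (j k : Nat) (msg : List Int) (hlen : msg.length = 2 ^ k)
    (hj : j ≤ k) : ∀ b ∈ pvChunks j msg, b.length = 2 ^ (k - j) := by
  induction j with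
  | zero => intro b hb; simp [pvChunks] at hb; subst hb; simpa using hlen
  | succ j ih =>
    intro b hb
    rw [pvChunks, List.mem_flatMap] at hb
    obtain ⟨c, hc, hb⟩ := hb
    have hcl : c.length = 2 ^ (k - j) := ih (by omega) c hc
    have hkj : k - j = (k - (j + 1)) + 1 := by omega
    have h2 : c.length / 2 = 2 ^ (k - (j + 1)) := by
      rw [hcl, hkj, pow_succ]; omega
    simp only [List.mem_cons, List.not_mem_nil, or_false] at hb
    rcases hb with rfl | rfl
    · rw [List.length_take, h2]; rw [hcl, hkj, pow_succ]; omega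
    · rw [List.length_drop, h2]; rw [hcl, hkj, pow_succ]; omega

theorem pvChunks_top (k : Nat) (msg : List Int) (hlen : msg.length = 2 ^ k) :
    pvChunks k msg = msg.map (fun b => [b]) := by
  induction k generalizing msg with
  | zero =>
    have : msg.length = 1 := by simpa using hlen
    obtain ⟨x, rfl⟩ := List.length_eq_one_iff.mp this
    simp [pvChunks]
  | succ k ih =>
    rw [pvChunks_append]
    have hhalf : msg.length / 2 = 2 ^ k := by rw [hlen, pow_succ]; omega
    have htl : (msg.take (msg.length / 2)).length = 2 ^ k := by
      rw [List.length_take, hhalf]; rw [hlen, pow_succ]; omega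
    have hdl : (msg.drop (msg.length / 2)).length = 2 ^ k := by
      rw [List.length_drop, hhalf]; rw [hlen, pow_succ]; omega
    rw [ih _ htl, ih _ hdl, ← List.map_append, List.take_append_drop]

theorem alt_singleton (x : Int) : polar_encode_alt [x] = [x] := by
  unfold polar_encode_alt; simp

theorem alt_split (msg : List Int) (h : 2 ≤ msg.length) :
    polar_encode_alt msg =
      pvConcat (polar_encode_alt (msg.take (msg.length / 2)))
               (polar_encode_alt (msg.drop (msg.length / 2))) := by
  rw [polar_encode_alt, dif_neg (by omega)]
  rfl

theorem flat2_getD {a b : Type} (xs : List a) (f g : a → b) (d : b) :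
    ∀ (n : Nat) (h : n < xs.length),
      (xs.flatMap (fun x => [f x, g x])).getD (2 * n) d = f xs[n] ∧
      (xs.flatMap (fun x => [f x, g x])).getD (2 * n + 1) d = g xs[n] := by
  induction xs with
  | nil => intro n h; simp at h
  | cons x xs ih =>
    intro n h
    cases n with
    | zero => simp [List.flatMap_cons]
    | succ n =>
      have h2 : 2 * (n + 1) = 2 * n + 1 + 1 := by omega
      simp only [List.flatMap_cons, List.cons_append, List.nil_append, h2,
        List.getD_cons_succ, List.getElem_cons_succ]
      exact ih n (by simpa using h)

theorem pvBuildFold (n : Nat) (acc : List (List (List Int))) (c : Nat) :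
    (List.range n).foldl (fun (st : List (List (List Int)) × Nat) _ =>
      (st.1 ++ [List.replicate st.2 ([] : List Int)], st.2 * 2)) (acc, c) =
    (acc ++ (List.range n).map (fun i => List.replicate (c * 2 ^ i) ([] : List Int)),
      c * 2 ^ n) := by
  induction n with
  | zero => simp
  | succ n ih =>
    rw [List.range_succ, List.foldl_append, ih]
    simp [pow_succ, Nat.mul_assoc]

-- the invariant the backward loop maintains
def pvGood (msg : List Int) (L : Nat) (t : List (List (List Int))) (m : Nat) : Prop :=
  t.length = L ∧
  t.getD m [] = (pvChunks m msg).map polar_encode_alt ∧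
  ∀ j < m, t.getD j [] = List.replicate (2 ^ j) ([] : List Int)

theorem pvStepA_good (msg : List Int) (k : Nat) (hlen : msg.length = 2 ^ k)
    (t : List (List (List Int))) (m : Nat) (hm : m + 1 ≤ k)
    (hg : pvGood msg (k + 1) t (m + 1)) : pvGood msg (k + 1) (pvStepA t m) m := by
  obtain ⟨hL, hup, hreps⟩ := hg
  have hmlt : m < t.length := by omega
  have hrep_m : t.getD m [] = List.replicate (2 ^ m) [] := hreps m (by omega)
  have hcnt : (t.getD m []).length = 2 ^ m := by rw [hrep_m]; simp
  simp only [pvStepA]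
  refine ⟨by simpa using hL, ?_, ?_⟩
  · rw [List.getD_eq_getElem _ _ (by simpa using hmlt), List.getElem_set_self]
    have hcnt' : (t[m]?.getD []).length = 2 ^ m := by
      simpa [List.getD] using hcnt
    apply List.ext_getElem
    · simp [hcnt', pvChunks_length]
    · intro n h1 h2
      have hn : n < (pvChunks m msg).length := by
        rw [pvChunks_length]; simpa [hcnt'] using h1
      simp only [List.getElem_map, List.getElem_range]
      rw [hup, pvChunks, List.map_flatMap]
      simp only [List.map_cons, List.map_nil]
      have hfg := flat2_getD (pvChunks m msg)
        (fun b => polar_encode_alt (b.take (b.length / 2)))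
        (fun b => polar_encode_alt (b.drop (b.length / 2))) [] n hn
      rw [hfg.1, hfg.2]
      have hb := pvChunks_block_length m k msg hlen (by omega) _ (List.getElem_mem hn)
      have h2b : 2 ≤ (pvChunks m msg)[n].length := by
        rw [hb]
        calc 2 = 2 ^ 1 := by norm_num
        _ ≤ 2 ^ (k - m) := Nat.pow_le_pow_right (by norm_num) (by omega)
      rw [← alt_split _ h2b]
  · intro j hj
    have hjlt : j < t.length := by omega
    rw [List.getD_eq_getElem _ _ (by simpa using hjlt),
      List.getElem_set_ne (by omega)]
    have := hreps j (by omega)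
    rwa [List.getD_eq_getElem _ _ hjlt] at this

theorem loop_good (msg : List Int) (k : Nat) (hlen : msg.length = 2 ^ k) :
    ∀ (m : Nat) (t : List (List (List Int))), m ≤ k → pvGood msg (k + 1) t m →
      pvGood msg (k + 1) (((List.range m).reverse).foldl pvStepA t) 0 := by
  intro m
  induction m with
  | zero => intro t _ hg; simpa using hg
  | succ m ih =>
    intro t hm hg
    rw [List.range_succ, List.reverse_append]
    simp only [List.reverse_cons, List.reverse_nil, List.nil_append,
      List.singleton_append, List.foldl_cons]
    exact ih _ (by omega) (pvStepA_good msg k hlen t m hm hg)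

theorem tree1_good (msg : List Int) (k : Nat) (hlen : msg.length = 2 ^ k) :
    pvGood msg (k + 1)
      ((((List.range (k + 1)).foldl
          (fun (st : List (List (List Int)) × Nat) _ =>
            (st.1 ++ [List.replicate st.2 ([] : List Int)], st.2 * 2)) ([], 1)).1).set k
        ((List.range msg.length).map (fun i => [msg.getD i 0]))) k := by
  rw [pvBuildFold]
  simp only [List.nil_append, one_mul]
  have hkL : k < ((List.range (k + 1)).map
      (fun i => List.replicate (2 ^ i) ([] : List Int))).length := by simp
  refine ⟨by simp, ?_, ?_⟩
  · rw [List.getD_eq_getElem _ _ (by simp), List.getElem_set_self]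
    rw [pvChunks_top k msg hlen, List.map_map]
    apply List.ext_getElem
    · simp
    · intro n h1 h2
      simp only [List.getElem_map, List.getElem_range, Function.comp]
      rw [List.getD_eq_getElem _ _ (by simpa using h2), alt_singleton]
  · intro j hj
    rw [List.getD_eq_getElem _ _ (by simp; omega), List.getElem_set_ne (by omega)]
    simp

-- ===== VERDICT (by name: the statement is the Claim_ definition above) =====
theorem polar_encode_spec : Claim_equal_polar_encode := by
  intro message _ hpre
  unfold Spec_polar_encode polar_encode
  set k := Nat.log2 message.length with hk
  have hlen : message.length = 2 ^ k := hpre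
  have hnlv : Nat.log2 message.length + 1 = k + 1 := by omega
  have h1 := tree1_good message k hlen
  have h2 := loop_good message k hlen k _ le_rfl h1
  obtain ⟨-, h0, -⟩ := h2
  simp only [Nat.add_sub_cancel]
  rw [h0]
  simp [pvChunks]
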